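-- pv_equiv track=rewrite | github.com/edt-yxz-zzd/python3_src | nn_ns/RMQ/LeftBiasedRMQ/canonical_Cartesian_tree/canonical_Cartesian_tree_of_array_to_balanced_Dyck_word.py | array2CanonicalCartesianRightOpenTreeRootRights_append_pop_ls
-- ===== SOURCE A (Python) =====
-- def array2CanonicalCartesianRightOpenTreeRootRights_append_pop_ls(iterable):
--     ''':: Ord a => Iter a -> Iter bool
--
--
-- time O(n)
-- time O(len input)
--
--
-- :: Ord a => [a] -> [(append|pop)]
--     append is True is open
--     pop is False is close
--
-- output:
--     balanced_Dyck_word :: [bool]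
--         len output == 2 * len input
--         output is balanced, i.e. num_appends == num_pops
--         output is balanced_Dyck_word
--
-- used to encode canonical_Cartesian_tree of array
--
-- see: ballot_number.py :: "encode canonical_Cartesian_tree" :: [(append|pop)]
-- see: canonical_Cartesian_tree_definition.py :: "Right Open"
--     see:
--         FreeCanonicalCartesianRightOpenReverseTree.py
--         or: CanonicalCartesianRightOpenTree.py
--         for how right_open_trees are constructed
--
-- example:
--     >>> this = canonical_Cartesian_tree_of_array_to_balanced_Dyck_word
--     >>> f = lambda iterable: list(this(iterable))
--     >>> f([])
--     []
--     >>> f([1])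
--     [True, False]
--     >>> f([1,2])
--     [True, True, False, False]
--     >>> f([1,1])
--     [True, True, False, False]
--     >>> f([1,0])
--     [True, False, True, False]
--     >>> f([2,1,0])
--     [True, False, True, False, True, False]
--     >>> f([1,2,0])
--     [True, True, False, False, True, False]
-- '''
--
--     POP = False
--     APPEND = True
--
--     stack = root_temp_right_descendants = []
--     for x in iterable:
--         while stack and x < stack[-1]:
--             yield POP; stack.pop()
--         yield APPEND; stack.append(x)
--     while stack:
--         yield POP; stack.pop()
-- ===== SOURCE B (Python) =====
-- def array2CanonicalCartesianRightOpenTreeRootRights_append_pop_ls(iterable):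
--     # Divide-and-conquer: split each segment at its leftmost minimum and emit
--     # encode(left), APPEND, encode(right), POP, driven by an explicit worklist
--     # instead of A's streaming monotonic stack.
--     work = [list(iterable)]
--     while work:
--         t = work.pop()
--         if isinstance(t, bool):
--             yield t
--             continue
--         if not t:
--             continue
--         i = t.index(min(t))
--         work.extend([False, t[i + 1:], True, t[:i]])
-- ===== Notes on version B (the rewrite author's own statement) =====
-- stated objective: alternative
-- what changed: Replaces the streaming monotonic-stack generator by a divide-and-conquer encoder driven by an explicit worklist: each segment is split at its leftmost minimum (t.index(min(t))) and emits encode(left) ++ [True] ++ encode(right) ++ [False].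
import Mathlib
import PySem

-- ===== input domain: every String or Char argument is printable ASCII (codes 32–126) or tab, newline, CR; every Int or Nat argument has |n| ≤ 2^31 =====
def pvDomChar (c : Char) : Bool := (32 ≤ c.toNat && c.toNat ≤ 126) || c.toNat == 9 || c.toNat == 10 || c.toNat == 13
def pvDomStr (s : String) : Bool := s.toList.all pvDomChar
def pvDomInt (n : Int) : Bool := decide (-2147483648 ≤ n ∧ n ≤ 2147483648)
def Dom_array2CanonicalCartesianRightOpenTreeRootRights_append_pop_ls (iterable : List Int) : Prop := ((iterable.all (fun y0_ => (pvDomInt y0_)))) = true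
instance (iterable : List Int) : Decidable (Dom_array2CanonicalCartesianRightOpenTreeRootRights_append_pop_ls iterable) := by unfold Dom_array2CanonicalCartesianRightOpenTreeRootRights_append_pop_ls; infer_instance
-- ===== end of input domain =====

-- B replaces A's streaming monotonic-stack generator by an equally exact divide-and-conquer
-- encoder (worklist; each segment split at its leftmost minimum): an alternative algorithm,
-- not a speed claim.


-- ===== PORT A =====
-- Stack kept head-as-top (Python appends/pops at the end); same steps, same values.
def pvPopPhase (x : Int) : List Int → List Bool × List Int
  | [] => ([], [])
  | t :: s =>
    if x < t then
      let p := pvPopPhase x s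
      (false :: p.1, p.2)
    else ([], t :: s)

def pvRun : List Int → List Int → List Bool × List Int
  | s, [] => ([], s)
  | s, x :: xs =>
    let p := pvPopPhase x s
    let q := pvRun (x :: p.2) xs
    (p.1 ++ true :: q.1, q.2)

def array2CanonicalCartesianRightOpenTreeRootRights_append_pop_ls (iterable : List Int) : List Bool :=
  let p := pvRun [] iterable
  p.1 ++ p.2.map (fun _ => false)

-- ===== PORT B =====
inductive PVItem : Type
  | emit : Bool → PVItem
  | enc : List Int → PVItem

def pvItemW : PVItem → Nat
  | .emit _ => 1
  | .enc a => 4 * a.length + 1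

def pvWorkW (ts : List PVItem) : Nat := (ts.map pvItemW).sum

-- `min(t)` for t = h :: tl is the fold of `min` over the tail (a library call in Source B)
theorem pvMinFold_mem (tl : List Int) : ∀ h : Int, tl.foldl min h ∈ h :: tl := by
  induction tl with
  | nil => intro h; simp
  | cons x tl ih =>
    intro h
    have := ih (min h x)
    rcases List.mem_cons.1 this with hc | hc
    · rcases min_choice h x with hmin | hmin
      · rw [List.foldl_cons, hc, hmin]; simp
      · rw [List.foldl_cons, hc, hmin]; simp
    · simp [List.foldl_cons]
      right; right; exact hc

-- worklist loop of B; items popped from the head (Python pops from the end)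
def pvLoop : List PVItem → List Bool
  | [] => []
  | .emit b :: ts => b :: pvLoop ts
  | .enc [] :: ts => pvLoop ts
  | .enc (h :: tl) :: ts =>
    let m := tl.foldl min h
    let i := (h :: tl).idxOf m
    pvLoop (.enc ((h :: tl).take i) :: .emit true ::
            .enc ((h :: tl).drop (i + 1)) :: .emit false :: ts)
termination_by ts => pvWorkW ts
decreasing_by
  · simp [pvWorkW, pvItemW]
  · simp [pvWorkW, pvItemW]
  · have hi : (h :: tl).idxOf (tl.foldl min h) < (h :: tl).length :=
      List.idxOf_lt_length_of_mem (pvMinFold_mem tl h)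
    simp only [List.length_cons] at hi
    simp [pvWorkW, pvItemW, List.length_take, List.length_drop]
    omega

def array2CanonicalCartesianRightOpenTreeRootRights_append_pop_ls_alt (iterable : List Int) : List Bool :=
  pvLoop [.enc iterable]

-- ===== PRECONDITION & SPEC =====
def Spec_array2CanonicalCartesianRightOpenTreeRootRights_append_pop_ls (iterable : List Int) (out : List Bool) : Prop := out = array2CanonicalCartesianRightOpenTreeRootRights_append_pop_ls_alt iterable
instance (iterable : List Int) (out : List Bool) : Decidable (Spec_array2CanonicalCartesianRightOpenTreeRootRights_append_pop_ls iterable out) := by unfold Spec_array2CanonicalCartesianRightOpenTreeRootRights_append_pop_ls; infer_instance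

-- ===== CLAIM (what is proved, stated in full; the proofs are below) =====
def Claim_equal_array2CanonicalCartesianRightOpenTreeRootRights_append_pop_ls : Prop := ∀ (iterable : List Int), Dom_array2CanonicalCartesianRightOpenTreeRootRights_append_pop_ls iterable → Spec_array2CanonicalCartesianRightOpenTreeRootRights_append_pop_ls iterable (array2CanonicalCartesianRightOpenTreeRootRights_append_pop_ls iterable)

-- ===== LEMMAS AND PROOFS =====
theorem pvRun_append (xs : List Int) : ∀ (s : List Int) (ys : List Int),
    pvRun s (xs ++ ys)
      = ((pvRun s xs).1 ++ (pvRun (pvRun s xs).2 ys).1, (pvRun (pvRun s xs).2 ys).2) := by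
  induction xs with
  | nil => intro s ys; simp [pvRun]
  | cons x xs ih => intro s ys; simp [pvRun, ih]

theorem pvPopPhase_sub (x : Int) (s : List Int) :
    ∀ z ∈ (pvPopPhase x s).2, z ∈ s := by
  induction s with
  | nil => simp [pvPopPhase]
  | cons t s ih =>
    simp only [pvPopPhase]
    split
    · intro z hz
      exact List.mem_cons_of_mem _ (ih z hz)
    · intro z hz; exact hz

theorem pvRun_mem (xs : List Int) : ∀ (s : List Int), ∀ z ∈ (pvRun s xs).2, z ∈ s ∨ z ∈ xs := by
  induction xs with
  | nil => intro s z hz; exact Or.inl hz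
  | cons x xs ih =>
    intro s z hz
    simp only [pvRun] at hz
    rcases ih _ z hz with h | h
    · rcases List.mem_cons.1 h with h | h
      · exact Or.inr (by simp [h])
      · exact Or.inl (pvPopPhase_sub x s z h)
    · exact Or.inr (List.mem_cons_of_mem _ h)

theorem pvPopPhase_all (x : Int) (s : List Int) (h : ∀ z ∈ s, x < z) :
    pvPopPhase x s = (List.replicate s.length false, []) := by
  induction s with
  | nil => simp [pvPopPhase]
  | cons t s ih =>
    simp only [pvPopPhase]
    rw [if_pos (h t (by simp))]
    rw [ih (fun z hz => h z (List.mem_cons_of_mem _ hz))]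
    simp [List.replicate_succ]

theorem pvPopPhase_base (x : Int) (base : List Int) (hb : ∀ b ∈ base, ¬ x < b) :
    ∀ (s : List Int),
    pvPopPhase x (s ++ base) = ((pvPopPhase x s).1, (pvPopPhase x s).2 ++ base) := by
  intro s
  induction s with
  | nil =>
    cases base with
    | nil => simp [pvPopPhase]
    | cons b base' =>
      simp only [List.nil_append, pvPopPhase]
      rw [if_neg (hb b (by simp))]
  | cons t s ih =>
    simp only [List.cons_append, pvPopPhase]
    split
    · simp [ih]
    · simp

theorem pvRun_base (xs : List Int) (base : List Int) :
    ∀ (s : List Int), (∀ y ∈ xs, ∀ b ∈ base, ¬ y < b) →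
    pvRun (s ++ base) xs = ((pvRun s xs).1, (pvRun s xs).2 ++ base) := by
  induction xs with
  | nil => intro s _; simp [pvRun]
  | cons x xs ih =>
    intro s h
    simp only [pvRun]
    rw [pvPopPhase_base x base (h x (by simp)) s]
    have := ih (x :: (pvPopPhase x s).2) (fun y hy => h y (List.mem_cons_of_mem _ hy))
    rw [← List.cons_append, this]

theorem pvA_key (l : List Int) (m : Int) (r : List Int)
    (hl : ∀ y ∈ l, m < y) (hr : ∀ y ∈ r, ¬ y < m) :
    array2CanonicalCartesianRightOpenTreeRootRights_append_pop_ls (l ++ m :: r)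
      = array2CanonicalCartesianRightOpenTreeRootRights_append_pop_ls l ++ true :: (array2CanonicalCartesianRightOpenTreeRootRights_append_pop_ls r ++ [false]) := by
  unfold array2CanonicalCartesianRightOpenTreeRootRights_append_pop_ls
  rw [pvRun_append l [] (m :: r)]
  have hstack : ∀ z ∈ (pvRun [] l).2, m < z := by
    intro z hz
    rcases pvRun_mem l [] z hz with h | h
    · simp at h
    · exact hl z h
  simp only [pvRun]
  rw [pvPopPhase_all m _ hstack]
  have hrb : ∀ y ∈ r, ∀ b ∈ [m], ¬ y < b := by
    intro y hy b hb
    simp at hb; subst hb; exact hr y hy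
  have := pvRun_base r [m] [] hrb
  simp only [List.nil_append] at this
  rw [show (m :: ([] : List Int)) = [m] from rfl, this]
  simp [List.map_const']

theorem pvMinFold_le (tl : List Int) :
    ∀ h : Int, tl.foldl min h ≤ h ∧ ∀ y ∈ tl, tl.foldl min h ≤ y := by
  induction tl with
  | nil => intro h; simp
  | cons x tl ih =>
    intro h
    have := ih (min h x)
    refine ⟨le_trans this.1 (min_le_left _ _), ?_⟩
    intro y hy
    rcases List.mem_cons.1 hy with hc | hc
    · subst hc; exact le_trans this.1 (min_le_right _ _)
    · exact this.2 y hc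

theorem pvTake_idxOf_ne (m : Int) : ∀ (t : List Int), ∀ y ∈ t.take (t.idxOf m), y ≠ m := by
  intro t
  induction t with
  | nil => simp
  | cons a t ih =>
    by_cases ham : a = m
    · simp [ham]
    · intro y hy
      simp only [List.idxOf_cons, Bool.cond_eq_ite, beq_iff_eq, if_neg ham,
        List.take_succ_cons] at hy
      rcases List.mem_cons.1 hy with hc | hc
      · subst hc; exact ham
      · exact ih y hc

theorem pvSplit_decomp (t : List Int) (m : Int) (hm : m ∈ t) :
    t.take (t.idxOf m) ++ m :: t.drop (t.idxOf m + 1) = t := by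
  have hi := List.idxOf_lt_length_of_mem hm
  conv_rhs => rw [← List.take_append_drop (t.idxOf m) t]
  rw [← List.getElem_cons_drop hi, List.getElem_idxOf]

def pvDenote : PVItem → List Bool
  | .emit b => [b]
  | .enc a => array2CanonicalCartesianRightOpenTreeRootRights_append_pop_ls a

theorem pvLoop_denote (ts : List PVItem) : pvLoop ts = (ts.map pvDenote).flatten := by
  induction ts using pvLoop.induct with
  | case1 => simp [pvLoop]
  | case2 b ts ih => simp [pvLoop, pvDenote, ih]
  | case3 ts ih =>
    simp [pvLoop, pvDenote, ih]
    simp [array2CanonicalCartesianRightOpenTreeRootRights_append_pop_ls, pvRun]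
  | case4 h tl ts m i ih =>
    have hm' : m = List.foldl min h tl := by
      rw [← List.attach_map_subtype_val tl, List.foldl_map]
    have hi' : i = List.idxOf (List.foldl min h tl) (h :: tl) := by rw [← hm']
    rw [hi'] at ih
    have hm : List.foldl min h tl ∈ h :: tl := pvMinFold_mem tl h
    have hle : ∀ y ∈ h :: tl, List.foldl min h tl ≤ y := by
      intro y hy
      rcases List.mem_cons.1 hy with hc | hc
      · rw [hc]; exact (pvMinFold_le tl h).1
      · exact (pvMinFold_le tl h).2 y hc
    have hl : ∀ y ∈ (h :: tl).take ((h :: tl).idxOf (List.foldl min h tl)),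
        List.foldl min h tl < y := by
      intro y hy
      exact lt_of_le_of_ne (hle y (List.mem_of_mem_take hy))
        (fun hc => pvTake_idxOf_ne (List.foldl min h tl) (h :: tl) y hy hc.symm)
    have hr : ∀ y ∈ (h :: tl).drop ((h :: tl).idxOf (List.foldl min h tl) + 1),
        ¬ y < List.foldl min h tl := by
      intro y hy
      exact not_lt_of_ge (hle y (List.mem_of_mem_drop hy))
    have hkey := pvA_key ((h :: tl).take ((h :: tl).idxOf (List.foldl min h tl)))
      (List.foldl min h tl)
      ((h :: tl).drop ((h :: tl).idxOf (List.foldl min h tl) + 1)) hl hr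
    rw [pvSplit_decomp (h :: tl) (List.foldl min h tl) hm] at hkey
    rw [pvLoop, ih]
    simp [pvDenote, hkey]

-- ===== VERDICT (by name: the statement is the Claim_ definition above) =====
theorem array2CanonicalCartesianRightOpenTreeRootRights_append_pop_ls_spec : Claim_equal_array2CanonicalCartesianRightOpenTreeRootRights_append_pop_ls := by
  intro iterable _
  unfold Spec_array2CanonicalCartesianRightOpenTreeRootRights_append_pop_ls array2CanonicalCartesianRightOpenTreeRootRights_append_pop_ls_alt
  rw [pvLoop_denote]
  simp [pvDenote]
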